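-- pv_equiv track=rewrite | github.com/Nghia03092004/nghia03092004.github.io | project_euler_unified/problem_612/solution.py | has_prime_permutation
-- ===== SOURCE A (Python) =====
-- from itertools import permutations
--
-- def is_prime(n):
--     if n < 2: return False
--     if n < 4: return True
--     if n % 2 == 0 or n % 3 == 0: return False
--     i = 5
--     while i * i <= n:
--         if n % i == 0 or n % (i + 2) == 0: return False
--         i += 6
--     return True
--
-- def has_prime_permutation(n):
--     """Check if any permutation of digits of n is prime."""
--     digits = str(n)
--     for perm in set(permutations(digits)):
--         if perm[0] != '0':
--             num = int(''.join(perm))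
--             if is_prime(num):
--                 return True
--     return False
-- ===== SOURCE B (Python) =====
-- def is_prime(n):
--     if n < 2: return False
--     if n < 4: return True
--     if n % 2 == 0 or n % 3 == 0: return False
--     i = 5
--     while i * i <= n:
--         if n % i == 0 or n % (i + 2) == 0: return False
--         i += 6
--     return True
--
-- def has_prime_permutation(n):
--     """Check if any permutation of digits of n is prime."""
--     s = str(n)
--     L = len(s)
--     counts = {}
--     for c in s:
--         counts[c] = counts.get(c, 0) + 1
--     items = list(counts.items())
--
--     def rec(prefix, rem):
--         if rem == 0:
--             return is_prime(int(prefix))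
--         for idx, (d, c) in enumerate(items):
--             if c == 0:
--                 continue
--             if rem == L and d == '0':
--                 continue
--             items[idx] = (d, c - 1)
--             found = rec(prefix + d, rem - 1)
--             items[idx] = (d, c)
--             if found:
--                 return True
--         return False
--
--     return rec('', L)
-- ===== Notes on version B (the rewrite author's own statement) =====
-- stated objective: faster
-- what changed: A materialises set(permutations(str(n))) (L! tuples, deduplicated by hashing) and tests each; B backtracks over a digit-count map, emitting each distinct arrangement exactly once and short-circuiting on the first prime found.
import Mathlib
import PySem

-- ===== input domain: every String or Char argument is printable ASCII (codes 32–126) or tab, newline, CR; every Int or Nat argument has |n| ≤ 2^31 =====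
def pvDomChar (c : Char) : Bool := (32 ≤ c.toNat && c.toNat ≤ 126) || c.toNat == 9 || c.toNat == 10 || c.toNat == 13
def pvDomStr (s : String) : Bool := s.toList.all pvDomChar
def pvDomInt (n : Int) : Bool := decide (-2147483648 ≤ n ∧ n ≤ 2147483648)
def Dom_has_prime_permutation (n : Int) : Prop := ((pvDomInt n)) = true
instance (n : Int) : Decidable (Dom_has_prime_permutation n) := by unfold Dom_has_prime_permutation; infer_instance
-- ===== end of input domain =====

-- B backtracks over a digit-count map, emitting each DISTINCT digit arrangement once and
-- short-circuiting on the first prime, instead of A's "materialise set(permutations(str(n)))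
-- and test each element" (objective: faster by avoiding the L!-sized tuple set; speed advisory).

-- ===== PORT A =====
-- while i*i <= n: … i += 6   (trial division 6k±1)
def isPrimeLoop (n i : Int) : Bool :=
  if i * i ≤ n then
    if PySem.Int.mod n i == 0 || PySem.Int.mod n (i + 2) == 0 then false
    else isPrimeLoop n (i + 6)
  else true
termination_by (n + 7 - i).toNat
decreasing_by
  have hi : i ≤ n := by nlinarith [mul_self_nonneg i]
  omega

def is_prime (n : Int) : Bool :=
  if n < 2 then false
  else if n < 4 then true
  else if PySem.Int.mod n 2 == 0 || PySem.Int.mod n 3 == 0 then false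
  else isPrimeLoop n 5

def has_prime_permutation (n : Int) : Bool :=
  let digits := PySem.Int.toChars n
  (PySem.Set.ofList (PySem.List.permutations digits digits.length)).any fun perm =>
    decide (PySem.List.pyGet? perm 0 ≠ some '0') &&
      match PySem.Int.ofChars? perm with   -- int(''.join(perm)); none = ValueError, excluded by Pre_
      | some num => is_prime num
      | none => false

-- ===== PORT B =====
-- Source B's rec(prefix, rem): try every digit with a positive count (skipping a leading '0'),
-- decrement its count, recurse; at rem == 0 test int(prefix) for primality.
def bRec : Nat → List Char → List (Char × Int) → Nat → Bool
  | 0, pref, _, _ =>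
      (match PySem.Int.ofChars? pref with   -- int(prefix); none = ValueError, excluded by Pre_
       | some num => is_prime num
       | none => false)
  | rem + 1, pref, items, L =>
      (List.range items.length).any fun idx =>
        match items[idx]? with
        | some (d, c) =>
          if c == 0 then false
          else if rem + 1 == L && d == '0' then false
          else bRec rem (pref ++ [d]) (items.set idx (d, c - 1)) L
        | none => false

def has_prime_permutation_alt (n : Int) : Bool :=
  let s := PySem.Int.toChars n
  let L := s.length
  let counts := s.foldl (fun (d : PySem.Dict Char Int) c => d.insert c (d.getD c 0 + 1)) PySem.Dict.empty
  bRec L [] counts.items L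

-- ===== PRECONDITION & SPEC =====
-- Pre_ excludes negative n, on which Python A raises ValueError (int() applied to a digit
-- arrangement with '-' in a non-leading position); B raises ValueError there as well.
def Pre_has_prime_permutation (n : Int) : Prop := 0 ≤ n
instance (n : Int) : Decidable (Pre_has_prime_permutation n) := by unfold Pre_has_prime_permutation; infer_instance
def pvWitness_has_prime_permutation : Int := 20

def Spec_has_prime_permutation (n : Int) (out : Bool) : Prop := out = has_prime_permutation_alt n
instance (n : Int) (out : Bool) : Decidable (Spec_has_prime_permutation n out) := by unfold Spec_has_prime_permutation; infer_instance

-- ===== CLAIM (what is proved, stated in full; the proofs are below) =====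
def Claim_equal_has_prime_permutation : Prop := ∀ (n : Int), Dom_has_prime_permutation n → Pre_has_prime_permutation n → Spec_has_prime_permutation n (has_prime_permutation n)

-- ===== LEMMAS AND PROOFS =====

-- the shared "int(cs) is prime" test both ports apply to a complete digit arrangement
def primeCheck (cs : List Char) : Bool :=
  match PySem.Int.ofChars? cs with
  | some num => is_prime num
  | none => false

-- the multiset of characters a counter's item list still holds
def expandCounts (items : List (Char × Int)) : List Char :=
  items.flatMap fun p => List.replicate p.2.toNat p.1

lemma mem_permutations_succ (xs : List Char) (r : Nat) (q : List Char) :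
    q ∈ PySem.List.permutations xs (r+1) ↔
      ∃ i, ∃ hi : i < xs.length, ∃ p ∈ PySem.List.permutations (xs.eraseIdx i) r, q = xs[i] :: p := by
  rw [PySem.List.permutations]
  rw [List.mem_flatMap]
  constructor
  · rintro ⟨i, hi, hm⟩
    have hilt : i < xs.length := List.mem_range.mp hi
    rw [List.getElem?_eq_getElem hilt] at hm
    simp only at hm
    obtain ⟨p, hp, hq⟩ := List.mem_map.mp hm
    exact ⟨i, hilt, p, hp, hq.symm⟩
  · rintro ⟨i, hilt, p, hp, hq⟩
    refine ⟨i, List.mem_range.mpr hilt, ?_⟩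
    rw [List.getElem?_eq_getElem hilt]
    simp only
    exact List.mem_map.mpr ⟨p, hp, hq.symm⟩

lemma mem_permutations_of_perm (p xs : List Char) (h : p.Perm xs) :
    p ∈ PySem.List.permutations xs xs.length := by
  induction p generalizing xs with
  | nil =>
      have : xs = [] := h.symm.eq_nil
      subst this
      exact List.mem_singleton.mpr rfl
  | cons d p' ih =>
      have hd : d ∈ xs := h.subset (List.mem_cons_self)
      obtain ⟨i, hi, hEq⟩ := List.mem_iff_getElem.mp hd
      have hperm : p'.Perm (xs.eraseIdx i) := by
        have h1 : (xs[i] :: xs.eraseIdx i).Perm xs := List.getElem_cons_eraseIdx_perm hi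
        have h2 : (d :: p').Perm (d :: xs.eraseIdx i) := by
          refine h.trans ?_
          rw [← hEq]
          exact h1.symm
        exact h2.cons_inv
      have hlen : (xs.eraseIdx i).length = p'.length := by
        have := h.length_eq
        simp [List.length_eraseIdx, hi] at this ⊢
        omega
      have hxslen : xs.length = p'.length + 1 := by
        have := h.length_eq; simpa using this.symm
      have ihm := ih (xs.eraseIdx i) hperm
      rw [hlen] at ihm
      rw [hxslen, mem_permutations_succ]
      exact ⟨i, hi, p', ihm, by rw [hEq]⟩

lemma count_expand_counts (l s : List Char) (hn : l.Nodup) (c : Char) :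
    ((l.flatMap fun k => List.replicate (s.count k) k).count c)
      = if c ∈ l then s.count c else 0 := by
  induction l with
  | nil => simp
  | cons k l ih =>
      have hk : k ∉ l := (List.nodup_cons.mp hn).1
      have hn' : l.Nodup := (List.nodup_cons.mp hn).2
      simp only [List.flatMap_cons, List.count_append, ih hn']
      by_cases hck : c = k
      · subst hck
        simp [hk]
      · simp [List.count_replicate, List.mem_cons, hck]
        intro h; exact absurd h.symm hck

lemma expand_counter_perm (s : List Char) :
    (expandCounts ((PySem.Dict.counter s).items)).Perm s := by
  rw [PySem.Dict.items_counter]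
  unfold expandCounts
  rw [List.flatMap_map]
  simp only [Int.toNat_natCast]
  refine List.perm_iff_count.mpr fun c => ?_
  rw [count_expand_counts _ s (PySem.Set.nodup_ofList s) c]
  by_cases hc : c ∈ s
  · simp [PySem.Set.mem_ofList, hc]
  · simp [PySem.Set.mem_ofList, hc, List.count_eq_zero.mpr hc]

lemma exists_index_of_mem_expand (items : List (Char × Int)) (d : Char)
    (h : d ∈ expandCounts items) :
    ∃ i, ∃ hi : i < items.length, items[i].1 = d ∧ items[i].2.toNat ≠ 0 := by
  obtain ⟨p, hp, hmem⟩ := List.mem_flatMap.mp h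
  obtain ⟨hne, hd⟩ := List.mem_replicate.mp hmem
  obtain ⟨i, hi, hEq⟩ := List.mem_iff_getElem.mp hp
  exact ⟨i, hi, by rw [hEq, hd], by rw [hEq]; exact hne⟩

lemma expand_set_perm (items : List (Char × Int)) (i : Nat) (hi : i < items.length)
    (d : Char) (c : Int) (hEq : items[i] = (d, c)) (hc : c.toNat ≠ 0) :
    (expandCounts items).Perm (d :: expandCounts (items.set i (d, c - 1))) := by
  have hsplit : items = items.take i ++ items[i] :: items.drop (i+1) := by
    conv_lhs => rw [← List.take_append_drop i items]
    rw [List.getElem_cons_drop hi]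
  have hset : items.set i (d, c - 1) = items.take i ++ (d, c - 1) :: items.drop (i+1) :=
    List.set_eq_take_cons_drop _ hi
  have hrep : c.toNat = (c - 1).toNat + 1 := by omega
  conv_lhs => rw [hsplit]
  rw [hset]
  unfold expandCounts
  simp only [List.flatMap_append, List.flatMap_cons, hEq, hrep, List.replicate_succ,
    List.cons_append]
  exact List.perm_middle

-- the backtracking invariant: bRec finds a completion iff some arrangement of the remaining
-- multiset (not starting with '0' when this is the first character) passes primeCheck
lemma bRec_iff (L : Nat) : ∀ (rem : Nat) (items : List (Char × Int)) (pref : List Char),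
    rem ≤ L →
    (∀ p ∈ items, 0 ≤ p.2) →
    (expandCounts items).length = rem →
    (bRec rem pref items L = true ↔
      ∃ ds : List Char, ds.Perm (expandCounts items) ∧
        (rem = L → ds.head? ≠ some '0') ∧ primeCheck (pref ++ ds) = true) := by
  intro rem
  induction rem with
  | zero =>
      intro items pref _ _ hlen
      have hnil : expandCounts items = [] := List.eq_nil_of_length_eq_zero hlen
      constructor
      · intro h
        exact ⟨[], by rw [hnil], by intro _; simp, by simpa [primeCheck] using h⟩
      · rintro ⟨ds, hperm, _, hpc⟩
        have : ds = [] := by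
          have := hperm.length_eq
          rw [hnil] at this
          exact List.eq_nil_of_length_eq_zero this
        subst this
        simpa [primeCheck] using hpc
  | succ rem ih =>
      intro items pref hle h1 hlen
      constructor
      · intro h
        obtain ⟨idx, hidxmem, hbody⟩ := List.any_eq_true.mp (by rw [bRec] at h; exact h)
        have hidx : idx < items.length := List.mem_range.mp hidxmem
        rw [List.getElem?_eq_getElem hidx] at hbody
        rcases hEq : items[idx] with ⟨d, c⟩
        rw [hEq] at hbody
        simp only at hbody
        by_cases hc0 : (c == 0) = true
        · rw [if_pos hc0] at hbody; exact absurd hbody (by simp)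
        rw [if_neg hc0] at hbody
        by_cases hg : (rem + 1 == L && d == '0') = true
        · rw [if_pos hg] at hbody; exact absurd hbody (by simp)
        rw [if_neg hg] at hbody
        have hcpos : 0 ≤ c := by
          have : (d, c) ∈ items := hEq ▸ List.getElem_mem hidx
          exact h1 _ this
        have hcne : c.toNat ≠ 0 := by
          simp only [beq_iff_eq] at hc0; omega
        have hsp := expand_set_perm items idx hidx d c hEq hcne
        have hlen' : (expandCounts (items.set idx (d, c - 1))).length = rem := by
          have := hsp.length_eq
          simp only [List.length_cons] at this
          omega
        have h1' : ∀ p ∈ items.set idx (d, c - 1), 0 ≤ p.2 := by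
          intro p hp
          rcases List.mem_or_eq_of_mem_set hp with hp' | hp'
          · exact h1 _ hp'
          · subst hp'; simp; omega
        obtain ⟨ds', hperm', _, hpc'⟩ :=
          (ih (items.set idx (d, c - 1)) (pref ++ [d]) (by omega) h1' hlen').mp hbody
        refine ⟨d :: ds', (hperm'.cons d).trans hsp.symm, ?_, ?_⟩
        · intro hL
          simp only [List.head?_cons, ne_eq, Option.some.injEq]
          intro hd0
          exact hg (by simp [hL, hd0])
        · simpa using hpc'
      · rintro ⟨ds, hperm, hguard, hpc⟩
        rcases ds with _ | ⟨d, ds'⟩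
        · exact absurd (hlen ▸ hperm.length_eq) (by simp)
        have hd : d ∈ expandCounts items := hperm.subset List.mem_cons_self
        obtain ⟨idx, hidx, hd1, hd2⟩ := exists_index_of_mem_expand items d hd
        have hEq : items[idx] = (d, items[idx].2) := by
          rw [← hd1]
        have hcpos : 0 ≤ items[idx].2 := h1 _ (List.getElem_mem hidx)
        have hsp := expand_set_perm items idx hidx d items[idx].2 hEq hd2
        have hlen' : (expandCounts (items.set idx (d, items[idx].2 - 1))).length = rem := by
          have := hsp.length_eq
          simp only [List.length_cons] at this
          omega
        have h1' : ∀ p ∈ items.set idx (d, items[idx].2 - 1), 0 ≤ p.2 := by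
          intro p hp
          rcases List.mem_or_eq_of_mem_set hp with hp' | hp'
          · exact h1 _ hp'
          · subst hp'; simp; omega
        have hperm' : ds'.Perm (expandCounts (items.set idx (d, items[idx].2 - 1))) :=
          (hperm.trans hsp).cons_inv
        have hrec : bRec rem (pref ++ [d]) (items.set idx (d, items[idx].2 - 1)) L = true := by
          refine (ih _ _ (by omega) h1' hlen').mpr ⟨ds', hperm', ?_, by simpa using hpc⟩
          intro hL; omega
        show bRec (rem + 1) pref items L = true
        simp only [bRec]
        refine List.any_eq_true.mpr ⟨idx, List.mem_range.mpr hidx, ?_⟩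
        rw [List.getElem?_eq_getElem hidx, hEq]
        simp only
        rw [if_neg (by simp only [beq_iff_eq]; omega)]
        rw [if_neg ?_]
        · exact hrec
        · simp only [Bool.and_eq_true, beq_iff_eq, not_and]
          intro hL hd0
          exact hguard (by omega) (by simp [hd0])

-- A's any-over-a-set is an any over the underlying list
lemma any_ofList (l : List (List Char)) (g : List Char → Bool) :
    (PySem.Set.ofList l).any g = l.any g := by
  rw [Bool.eq_iff_iff]
  simp only [List.any_eq_true]
  constructor
  · rintro ⟨x, hx, hg⟩; exact ⟨x, (PySem.Set.mem_ofList l x).mp hx, hg⟩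
  · rintro ⟨x, hx, hg⟩; exact ⟨x, (PySem.Set.mem_ofList l x).mpr hx, hg⟩

-- ===== VERDICT (by name: the statement is the Claim_ definition above) =====
theorem has_prime_permutation_spec : Claim_equal_has_prime_permutation := by
  intro n _ _
  unfold Spec_has_prime_permutation
  have hA : has_prime_permutation n = true ↔
      ∃ p : List Char, p.Perm (PySem.Int.toChars n) ∧ p.head? ≠ some '0' ∧ primeCheck p = true := by
    unfold has_prime_permutation
    rw [any_ofList, List.any_eq_true]
    constructor
    · rintro ⟨p, hp, hbody⟩
      rw [Bool.and_eq_true] at hbody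
      obtain ⟨hz, hpc⟩ := hbody
      refine ⟨p, PySem.List.perm_of_mem_permutations hp, ?_, hpc⟩
      rw [decide_eq_true_iff] at hz
      rwa [PySem.List.pyGet?_zero, ← List.head?_eq_getElem?] at hz
    · rintro ⟨p, hperm, hz, hpc⟩
      refine ⟨p, mem_permutations_of_perm p _ hperm, ?_⟩
      rw [Bool.and_eq_true]
      refine ⟨decide_eq_true_iff.mpr ?_, hpc⟩
      rwa [PySem.List.pyGet?_zero, ← List.head?_eq_getElem?]
  have hexp := expand_counter_perm (PySem.Int.toChars n)
  have h1 : ∀ p ∈ (PySem.Dict.counter (PySem.Int.toChars n)).items, 0 ≤ p.2 := by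
    rw [PySem.Dict.items_counter]
    intro p hp
    obtain ⟨k, _, hk⟩ := List.mem_map.mp hp
    rw [← hk]
    exact Int.natCast_nonneg _
  have hlen : (expandCounts ((PySem.Dict.counter (PySem.Int.toChars n)).items)).length
      = (PySem.Int.toChars n).length := hexp.length_eq
  have hB : has_prime_permutation_alt n = true ↔
      ∃ p : List Char, p.Perm (PySem.Int.toChars n) ∧ p.head? ≠ some '0' ∧ primeCheck p = true := by
    unfold has_prime_permutation_alt
    dsimp only
    rw [PySem.Dict.foldl_insert_getD_add_one_eq_counter]
    rw [bRec_iff (PySem.Int.toChars n).length (PySem.Int.toChars n).length _ [] le_rfl h1 hlen]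
    constructor
    · rintro ⟨ds, hperm, hguard, hpc⟩
      exact ⟨ds, hperm.trans hexp, hguard rfl, by simpa using hpc⟩
    · rintro ⟨p, hperm, hz, hpc⟩
      exact ⟨p, hperm.trans hexp.symm, fun _ => hz, by simpa using hpc⟩
  rw [Bool.eq_iff_iff]
  exact hA.trans hB.symm
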